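-- pv_equiv track=rewrite | github.com/mKopac/ZP_Kopac | PythonFormatter.py | reindent_lines
-- ===== SOURCE A (Python) =====
-- def count_leading_spaces(line):
--     """Return the number of leading spaces in the given line."""
--     return len(line) - len(line.lstrip(' '))
--
-- def process_block(lines, start_index, parent_indent):
--     """
--     Recursively adjusts the indentation of lines in a block.
--
--     - The new base indent for the block is parent's indent + 4.
--     - The first non-empty line in the block is used as a marker.
--     - For each line in the block, the new indent = block_base + (original_indent - marker).
--     - If a line ends with a colon, process its nested block recursively.
--
--     Returns the index after the block.
--     """
--     i = start_index
--     marker = None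
--     while i < len(lines):
--         if lines[i].strip() != "":
--             marker = count_leading_spaces(lines[i])
--             break
--         i += 1
--     if marker is None:
--         return i
--
--     block_base = parent_indent + 4
--     while i < len(lines):
--         if lines[i].strip() == "":
--             i += 1
--             continue
--         current_indent = count_leading_spaces(lines[i])
--         if current_indent < marker:
--             break
--         relative = current_indent - marker
--         new_indent = block_base + relative
--         lines[i] = " " * new_indent + lines[i].lstrip(' ')
--         if lines[i].rstrip().endswith(":"):
--             i = process_block(lines, i + 1, new_indent)
--         else:
--             i += 1
--     return i
--
-- def reindent_lines(lines):
--     """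
--     Adjusts the indentation for the whole code based on the following heuristic:
--       - For any line ending with a colon (":") that starts a block,
--         subsequent non-empty lines with indent >= marker indent are reindented
--         to (parent's indent + 4) plus their relative indent.
--     """
--     i = 0
--     while i < len(lines):
--         if lines[i].strip() == "":
--             i += 1
--             continue
--         if lines[i].rstrip().endswith(":"):
--             parent_indent = count_leading_spaces(lines[i])
--             i = process_block(lines, i + 1, parent_indent)
--         else:
--             i += 1
--     return lines
-- ===== SOURCE B (Python) =====
-- def reindent_lines(lines):
--     """Single pass with an explicit stack of open blocks.
--
--     Each frame is (marker, block_base): marker is the original indent of the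
--     first non-empty line of the block (None until that line is seen), and
--     block_base is the indent the block's lines are rebased to.
--     Note: unlike A (which rewrites `lines` in place), this builds a new list;
--     the equivalence claimed is about the return value.
--     """
--     stack = []
--     out = []
--     for line in lines:
--         if line.strip() == "":
--             out.append(line)
--             continue
--         ind = len(line) - len(line.lstrip(' '))
--         # a dedented line closes every block whose marker it falls below
--         while stack and stack[-1][0] is not None and ind < stack[-1][0]:
--             stack.pop()
--         if stack:
--             marker, base = stack[-1]
--             if marker is None:
--                 marker = ind
--                 stack[-1] = (ind, base)
--             new_indent = base + (ind - marker)
--             line = " " * new_indent + line.lstrip(' ')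
--         else:
--             new_indent = ind
--         out.append(line)
--         if line.rstrip().endswith(":"):
--             stack.append((None, new_indent + 4))
--     return out
-- ===== Notes on version B (the rewrite author's own statement) =====
-- stated objective: alternative
-- what changed: Replaced the recursive in-place block processor (recursion per nested block, break/return chains for dedents) by a single left-to-right pass over the lines with an explicit stack of (marker, block_base) frames that is popped in a loop on dedent; B builds a new list instead of mutating the argument.
import Mathlib
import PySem

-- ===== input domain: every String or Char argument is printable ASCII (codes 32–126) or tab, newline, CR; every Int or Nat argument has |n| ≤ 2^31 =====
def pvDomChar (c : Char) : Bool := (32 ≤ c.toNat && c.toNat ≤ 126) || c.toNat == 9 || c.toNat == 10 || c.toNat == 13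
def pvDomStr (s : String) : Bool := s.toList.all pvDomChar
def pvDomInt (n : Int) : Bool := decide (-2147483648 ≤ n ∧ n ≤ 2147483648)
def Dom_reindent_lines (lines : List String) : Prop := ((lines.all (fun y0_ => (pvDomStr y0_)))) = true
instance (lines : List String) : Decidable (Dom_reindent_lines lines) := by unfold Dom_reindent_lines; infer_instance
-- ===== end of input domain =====

-- B replaces A's recursion with an in-place mutated list by one pass with an explicit
-- stack of (marker, block_base) frames; A mutates its argument, B does not — the
-- equivalence proved is about the return value.

-- ===== PORT A =====
-- count_leading_spaces(line) = len(line) - len(line.lstrip(' '))  (lstrip(' ') ported by hand as dropWhile (· == ' '); exact)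
def pvCLS (line : String) : Int :=
  PySem.Str.len line - PySem.Str.len (String.ofList (line.toList.dropWhile (· == ' ')))

-- lines[i].strip() == ""
def pvIsEmpty (line : String) : Bool := PySem.Str.strip line == ""

-- lines[i].rstrip().endswith(":")
def pvEndsColon (line : String) : Bool := PySem.Str.endswith (PySem.Str.rstrip line) ":"

-- " " * new_indent + line.lstrip(' ')  (for new_indent < 0 Python's " " * n is ""; toNat matches)
def pvReindent (line : String) (n : Int) : String :=
  String.ofList (List.replicate n.toNat ' ' ++ line.toList.dropWhile (· == ' '))

-- A's loops/recursion are totalised with a fuel argument; the entry point passes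
-- 2*len+1 fuel, which pvTopLoop_spec proves sufficient (the fuel-0 clauses are never hit).
-- the first 'while' of process_block: advance i past empty lines
def pvFindNonEmpty (lines : List String) : Nat → Nat → Nat
  | 0, i => i
  | fuel + 1, i =>
    if i < lines.length then
      if pvIsEmpty (lines.getD i "") then pvFindNonEmpty lines fuel (i + 1) else i
    else i

mutual
-- the second 'while' of process_block (marker already found)
def pvBlockLoop : Nat → List String → Nat → Int → Int → List String × Nat
  | 0, lines, i, _, _ => (lines, i)
  | fuel + 1, lines, i, marker, base =>
    if i < lines.length then
      let l := lines.getD i ""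
      if pvIsEmpty l then pvBlockLoop fuel lines (i + 1) marker base
      else
        let ci := pvCLS l
        if ci < marker then (lines, i)
        else
          let ni := base + (ci - marker)
          let l' := pvReindent l ni
          let lines' := lines.set i l'
          if pvEndsColon l' then
            let r := pvProcessBlock fuel lines' (i + 1) ni
            pvBlockLoop fuel r.1 r.2 marker base
          else pvBlockLoop fuel lines' (i + 1) marker base
    else (lines, i)

-- process_block(lines, start_index, parent_indent)
def pvProcessBlock : Nat → List String → Nat → Int → List String × Nat
  | 0, lines, start, _ => (lines, start)
  | fuel + 1, lines, start, parent =>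
    let m := pvFindNonEmpty lines lines.length start
    if m < lines.length then
      let marker := pvCLS (lines.getD m "")
      pvBlockLoop fuel lines m marker (parent + 4)
    else (lines, m)
end

-- the loop of reindent_lines
def pvTopLoop : Nat → List String → Nat → List String
  | 0, lines, _ => lines
  | fuel + 1, lines, i =>
    if i < lines.length then
      let l := lines.getD i ""
      if pvIsEmpty l then pvTopLoop fuel lines (i + 1)
      else if pvEndsColon l then
        let r := pvProcessBlock fuel lines (i + 1) (pvCLS l)
        pvTopLoop fuel r.1 r.2
      else pvTopLoop fuel lines (i + 1)
    else lines

def reindent_lines (lines : List String) : List String :=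
  pvTopLoop (2 * lines.length + 1) lines 0

-- ===== PORT B =====
-- pop frames whose (set) marker lies above the current indent
def pvPop (ind : Int) : List (Option Int × Int) → List (Option Int × Int)
  | [] => []
  | (some mk, b) :: rest => if ind < mk then pvPop ind rest else (some mk, b) :: rest
  | (none, b) :: rest => (none, b) :: rest

-- the single pass: stack of (marker?, block_base) frames
def pvScan (stack : List (Option Int × Int)) : List String → List String
  | [] => []
  | l :: rest =>
    if pvIsEmpty l then l :: pvScan stack rest
    else
      let ind := pvCLS l
      match pvPop ind stack with
      | [] =>
        let st' := if pvEndsColon l then [((none : Option Int), ind + 4)] else []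
        l :: pvScan st' rest
      | (m, b) :: tail =>
        let mk := match m with | none => ind | some x => x
        let nw := b + (ind - mk)
        let l' := pvReindent l nw
        let st1 := (some mk, b) :: tail
        let st' := if pvEndsColon l' then ((none : Option Int), nw + 4) :: st1 else st1
        l' :: pvScan st' rest

def reindent_lines_alt (lines : List String) : List String := pvScan [] lines

-- ===== PRECONDITION & SPEC =====
def Spec_reindent_lines (lines : List String) (out : List String) : Prop := out = reindent_lines_alt lines
instance (lines : List String) (out : List String) : Decidable (Spec_reindent_lines lines out) := by unfold Spec_reindent_lines; infer_instance

-- ===== CLAIM (what is proved, stated in full; the proofs are below) =====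
def Claim_equal_reindent_lines : Prop := ∀ (lines : List String), Dom_reindent_lines lines → Spec_reindent_lines lines (reindent_lines lines)

-- ===== LEMMAS AND PROOFS =====

-- basic facts about the empty-line scan of process_block
theorem pvFNE_ge (lines : List String) (fuel i : Nat) : i ≤ pvFindNonEmpty lines fuel i := by
  induction fuel generalizing i with
  | zero => simp [pvFindNonEmpty]
  | succ f ih =>
    simp only [pvFindNonEmpty]
    split_ifs with h1 h2
    · exact le_trans (Nat.le_succ i) (ih (i + 1))
    · exact le_refl i
    · exact le_refl i

theorem pvFNE_le (lines : List String) (fuel i : Nat) (h : i ≤ lines.length) :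
    pvFindNonEmpty lines fuel i ≤ lines.length := by
  induction fuel generalizing i with
  | zero => simpa [pvFindNonEmpty]
  | succ f ih =>
    simp only [pvFindNonEmpty]
    split_ifs with h1 h2
    · exact ih (i + 1) (by omega)
    · exact h
    · exact h

theorem pvFNE_empty (lines : List String) (fuel i : Nat) :
    ∀ k, i ≤ k → k < pvFindNonEmpty lines fuel i → pvIsEmpty (lines.getD k "") = true := by
  induction fuel generalizing i with
  | zero => intro k h1 h2; simp [pvFindNonEmpty] at h2; omega
  | succ f ih =>
    intro k hk1 hk2
    simp only [pvFindNonEmpty] at hk2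
    split_ifs at hk2 with h1 h2
    · rcases Nat.eq_or_lt_of_le hk1 with rfl | h3
      · exact h2
      · exact ih (i + 1) k h3 hk2
    · omega
    · omega

theorem pvFNE_nonempty (lines : List String) (fuel i : Nat)
    (hf : lines.length - i ≤ fuel)
    (h : pvFindNonEmpty lines fuel i < lines.length) :
    pvIsEmpty (lines.getD (pvFindNonEmpty lines fuel i) "") = false := by
  induction fuel generalizing i with
  | zero => simp only [pvFindNonEmpty] at h; omega
  | succ f ih =>
    by_cases h1 : i < lines.length
    · by_cases h2 : pvIsEmpty (lines.getD i "") = true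
      · have hr : pvFindNonEmpty lines (f + 1) i = pvFindNonEmpty lines f (i + 1) := by
          simp only [pvFindNonEmpty]
          rw [if_pos h1, if_pos h2]
        rw [hr] at h ⊢
        exact ih (i + 1) (by omega) h
      · have hr : pvFindNonEmpty lines (f + 1) i = i := by
          simp only [pvFindNonEmpty]
          rw [if_pos h1, if_neg h2]
        rw [hr] at h ⊢
        simpa using h2
    · have hr : pvFindNonEmpty lines (f + 1) i = i := by
        simp only [pvFindNonEmpty]
        rw [if_neg h1]
      rw [hr] at h
      omega

-- the contiguous segment lines[a:b]
def pvSeg (L : List String) (a b : Nat) : List String := (L.drop a).take (b - a)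

theorem pvSeg_eq (L : List String) (a b : Nat) : pvSeg L a b = (L.take b).drop a := by
  simp [pvSeg, List.drop_take]

theorem pvSeg_self (L : List String) (a : Nat) : pvSeg L a a = [] := by simp [pvSeg]

theorem pvSeg_split (L : List String) {a b c : Nat} (h1 : a ≤ b) (h2 : b ≤ c) :
    pvSeg L a c = pvSeg L a b ++ pvSeg L b c := by
  unfold pvSeg
  have hc : c - a = (b - a) + (c - b) := by omega
  rw [hc, List.take_add, List.drop_drop]
  have : a + (b - a) = b := by omega
  rw [this]

theorem pvSeg_congr {L M : List String} {a b : Nat} (h : L.take b = M.take b) :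
    pvSeg L a b = pvSeg M a b := by rw [pvSeg_eq, pvSeg_eq, h]

theorem pvSeg_single (L : List String) {i : Nat} (h : i < L.length) :
    pvSeg L i (i + 1) = [L.getD i ""] := by
  unfold pvSeg
  have h1 : i + 1 - i = 1 := by omega
  rw [h1, List.drop_eq_getElem_cons h, List.take_succ_cons, List.take_zero,
    List.getD_eq_getElem _ _ h]

theorem pvSeg_zero (L : List String) (b : Nat) : pvSeg L 0 b = L.take b := by simp [pvSeg]

theorem pvTake_mono {L M : List String} {a b : Nat} (h : L.take b = M.take b) (hab : a ≤ b) :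
    L.take a = M.take a := by
  have h1 : (L.take b).take a = (M.take b).take a := by rw [h]
  simpa [List.take_take, Nat.min_eq_left hab] using h1

theorem pvDrop_mono {L M : List String} {a b : Nat} (h : L.drop a = M.drop a) (hab : a ≤ b) :
    L.drop b = M.drop b := by
  have hb : b = a + (b - a) := by omega
  rw [hb, ← List.drop_drop, h, List.drop_drop]

theorem pvSet_take (L : List String) (i : Nat) (x : String) : (L.set i x).take i = L.take i := by
  rw [List.take_set]
  apply List.set_eq_of_length_le
  simp

theorem pvSet_drop (L : List String) (i : Nat) (x : String) :
    (L.set i x).drop (i + 1) = L.drop (i + 1) := by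
  rw [List.drop_set]; simp

-- one-step evaluation lemmas for pvScan
theorem pvScan_cons_empty (st : List (Option Int × Int)) (l : String) (rest : List String)
    (h : pvIsEmpty l = true) : pvScan st (l :: rest) = l :: pvScan st rest := by
  simp [pvScan, h]

theorem pvScan_cons_pop {l : String} {mk b : Int} {S : List (Option Int × Int)} {rest : List String}
    (h : pvIsEmpty l = false) (h2 : pvCLS l < mk) :
    pvScan ((some mk, b) :: S) (l :: rest) = pvScan S (l :: rest) := by
  conv_lhs => rw [pvScan]
  conv_rhs => rw [pvScan]
  simp [h, pvPop, h2]

theorem pvScan_cons_pending {l : String} {b : Int} {S : List (Option Int × Int)} {rest : List String}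
    (h : pvIsEmpty l = false) :
    pvScan ((none, b) :: S) (l :: rest) = pvScan ((some (pvCLS l), b) :: S) (l :: rest) := by
  conv_lhs => rw [pvScan]
  conv_rhs => rw [pvScan]
  simp [h, pvPop]

theorem pvScan_cons_active {l : String} {mk b : Int} {S : List (Option Int × Int)} {rest : List String}
    (h : pvIsEmpty l = false) (h2 : ¬ pvCLS l < mk) :
    pvScan ((some mk, b) :: S) (l :: rest) =
      pvReindent l (b + (pvCLS l - mk)) ::
        pvScan (if pvEndsColon (pvReindent l (b + (pvCLS l - mk)))
                then ((none : Option Int), b + (pvCLS l - mk) + 4) :: (some mk, b) :: S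
                else (some mk, b) :: S) rest := by
  conv_lhs => rw [pvScan]
  simp [h, pvPop, h2]

theorem pvScan_cons_nil_stack {l : String} {rest : List String} (h : pvIsEmpty l = false) :
    pvScan [] (l :: rest) =
      l :: pvScan (if pvEndsColon l then [((none : Option Int), pvCLS l + 4)] else []) rest := by
  conv_lhs => rw [pvScan]
  simp [h, pvPop]

-- skipping a run of empty lines leaves the stack unchanged
theorem pvScan_skip_empties (L : List String) {i m : Nat} (him : i ≤ m) (hm : m ≤ L.length)
    (he : ∀ k, i ≤ k → k < m → pvIsEmpty (L.getD k "") = true) (st : List (Option Int × Int)) :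
    pvScan st (L.drop i) = pvSeg L i m ++ pvScan st (L.drop m) := by
  induction hd : m - i generalizing i with
  | zero =>
    have : i = m := by omega
    subst this
    simp [pvSeg_self]
  | succ n ih =>
    have hi : i < m := by omega
    have hil : i < L.length := by omega
    rw [List.drop_eq_getElem_cons hil]
    have hempty : pvIsEmpty (L.getD i "") = true := he i (le_refl i) hi
    have hgd : L.getD i "" = L[i] := by simp [List.getD, hil]
    rw [pvScan_cons_empty st _ _ (by rw [← hgd]; exact hempty)]
    rw [ih (by omega) (fun k hk1 hk2 => he k (by omega) hk2) (by omega)]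
    rw [pvSeg_split L (by omega : i ≤ i + 1) (by omega : i + 1 ≤ m), pvSeg_single L hil, hgd]
    simp

-- ===== MAIN INVARIANT =====
-- joint invariant for the two mutually recursive functions, by induction on fuel
theorem pvBoth_spec (fuel : Nat) :
    (∀ (lines : List String) (i : Nat) (marker base : Int), i ≤ lines.length →
      2 * (lines.length - i) + 1 ≤ fuel →
      i ≤ (pvBlockLoop fuel lines i marker base).2 ∧
      (pvBlockLoop fuel lines i marker base).2 ≤ lines.length ∧
      (pvBlockLoop fuel lines i marker base).1.length = lines.length ∧
      (pvBlockLoop fuel lines i marker base).1.take i = lines.take i ∧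
      (pvBlockLoop fuel lines i marker base).1.drop (pvBlockLoop fuel lines i marker base).2
        = lines.drop (pvBlockLoop fuel lines i marker base).2 ∧
      ∀ S, pvScan ((some marker, base) :: S) (lines.drop i)
          = pvSeg (pvBlockLoop fuel lines i marker base).1 i (pvBlockLoop fuel lines i marker base).2
            ++ pvScan S (lines.drop (pvBlockLoop fuel lines i marker base).2)) ∧
    (∀ (lines : List String) (start : Nat) (parent : Int), start ≤ lines.length →
      2 * (lines.length - start) + 2 ≤ fuel →
      start ≤ (pvProcessBlock fuel lines start parent).2 ∧
      (pvProcessBlock fuel lines start parent).2 ≤ lines.length ∧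
      (pvProcessBlock fuel lines start parent).1.length = lines.length ∧
      (pvProcessBlock fuel lines start parent).1.take start = lines.take start ∧
      (pvProcessBlock fuel lines start parent).1.drop (pvProcessBlock fuel lines start parent).2
        = lines.drop (pvProcessBlock fuel lines start parent).2 ∧
      ∀ S, pvScan ((none, parent + 4) :: S) (lines.drop start)
          = pvSeg (pvProcessBlock fuel lines start parent).1 start (pvProcessBlock fuel lines start parent).2
            ++ pvScan S (lines.drop (pvProcessBlock fuel lines start parent).2)) := by
  induction fuel with
  | zero =>
    exact ⟨fun _ _ _ _ _ hf => absurd hf (by omega), fun _ _ _ _ hf => absurd hf (by omega)⟩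
  | succ f ih =>
    obtain ⟨ihBL, ihPB⟩ := ih
    constructor
    · -- the block loop
      intro lines i marker base hi hf
      simp only [pvBlockLoop]
      by_cases h : i < lines.length
      · rw [if_pos h]
        have hgd : lines.getD i "" = lines[i] := by simp [List.getD, h]
        by_cases hemp : pvIsEmpty (lines.getD i "") = true
        · -- empty line: skip it
          rw [if_pos hemp]
          obtain ⟨a0, a1, a2, hb, hc, hd⟩ := ihBL lines (i + 1) marker base (by omega) (by omega)
          refine ⟨by omega, a1, a2, pvTake_mono hb (by omega), hc, ?_⟩
          intro S
          rw [List.drop_eq_getElem_cons h, ← hgd, pvScan_cons_empty _ _ _ hemp, hd S,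
            pvSeg_split _ (Nat.le_succ i) a0, pvSeg_congr hb, pvSeg_single lines h]
          simp
        · have hne : pvIsEmpty (lines.getD i "") = false := by
            simpa using hemp
          rw [if_neg hemp]
          by_cases hci : pvCLS (lines.getD i "") < marker
          · -- dedent: the block ends here
            rw [if_pos hci]
            refine ⟨le_refl i, hi, rfl, by simp, by simp, ?_⟩
            intro S
            rw [List.drop_eq_getElem_cons h, ← hgd, pvScan_cons_pop hne hci, hgd,
              ← List.drop_eq_getElem_cons h, pvSeg_self]
            simp
          · rw [if_neg hci]
            have hlen' : ((lines.set i (pvReindent (lines.getD i "") (base + (pvCLS (lines.getD i "") - marker))))).length = lines.length := by simp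
            have hgd' : ((lines.set i (pvReindent (lines.getD i "") (base + (pvCLS (lines.getD i "") - marker))))).getD i "" = pvReindent (lines.getD i "") (base + (pvCLS (lines.getD i "") - marker)) := by
              simp [List.getD, h]
            by_cases hcolon : pvEndsColon (pvReindent (lines.getD i "") (base + (pvCLS (lines.getD i "") - marker))) = true
            · rw [if_pos hcolon]
              obtain ⟨p0, p1, p2, pb, pc, pd⟩ := ihPB (lines.set i (pvReindent (lines.getD i "") (base + (pvCLS (lines.getD i "") - marker)))) (i + 1) (base + (pvCLS (lines.getD i "") - marker)) (by
                  rw [hlen']; omega) (by rw [hlen']; omega)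
              obtain ⟨q0, q1, q2, qb, qc, qd⟩ := ihBL (pvProcessBlock f (lines.set i (pvReindent (lines.getD i "") (base + (pvCLS (lines.getD i "") - marker)))) (i + 1) (base + (pvCLS (lines.getD i "") - marker))).1 (pvProcessBlock f (lines.set i (pvReindent (lines.getD i "") (base + (pvCLS (lines.getD i "") - marker)))) (i + 1) (base + (pvCLS (lines.getD i "") - marker))).2 marker base (by omega) (by omega)
              have hdrop3 : ((pvProcessBlock f (lines.set i (pvReindent (lines.getD i "") (base + (pvCLS (lines.getD i "") - marker)))) (i + 1) (base + (pvCLS (lines.getD i "") - marker))).1).drop (pvBlockLoop f (pvProcessBlock f (lines.set i (pvReindent (lines.getD i "") (base + (pvCLS (lines.getD i "") - marker)))) (i + 1) (base + (pvCLS (lines.getD i "") - marker))).1 (pvProcessBlock f (lines.set i (pvReindent (lines.getD i "") (base + (pvCLS (lines.getD i "") - marker)))) (i + 1) (base + (pvCLS (lines.getD i "") - marker))).2 marker base).2 = lines.drop (pvBlockLoop f (pvProcessBlock f (lines.set i (pvReindent (lines.getD i "") (base + (pvCLS (lines.getD i "") - marker)))) (i + 1) (base + (pvCLS (lines.getD i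 "") - marker))).1 (pvProcessBlock f (lines.set i (pvReindent (lines.getD i "") (base + (pvCLS (lines.getD i "") - marker)))) (i + 1) (base + (pvCLS (lines.getD i "") - marker))).2 marker base).2 := by
                rw [pvDrop_mono pc q0]
                exact pvDrop_mono (pvSet_drop lines i _) (by omega)
              have htake : ((pvBlockLoop f (pvProcessBlock f (lines.set i (pvReindent (lines.getD i "") (base + (pvCLS (lines.getD i "") - marker)))) (i + 1) (base + (pvCLS (lines.getD i "") - marker))).1 (pvProcessBlock f (lines.set i (pvReindent (lines.getD i "") (base + (pvCLS (lines.getD i "") - marker)))) (i + 1) (base + (pvCLS (lines.getD i "") - marker))).2 marker base).1).take (i + 1) = (lines.set i (pvReindent (lines.getD i "") (base + (pvCLS (lines.getD i "") - marker)))).take (i + 1) :=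
                (pvTake_mono qb (by omega)).trans pb
              refine ⟨by omega, by omega, by omega, ?_, ?_, ?_⟩
              · rw [pvTake_mono qb (by omega), pvTake_mono pb (by omega), pvSet_take]
              · rw [qc, hdrop3]
              · intro S
                rw [List.drop_eq_getElem_cons h, ← hgd, pvScan_cons_active hne hci,
                  if_pos hcolon, ← pvSet_drop lines i (pvReindent (lines.getD i "") (base + (pvCLS (lines.getD i "") - marker))),
                  pd ((some marker, base) :: S), ← pc, qd S, hdrop3,
                  pvSeg_split _ (Nat.le_succ i) (by omega : i + 1 ≤ (pvBlockLoop f (pvProcessBlock f (lines.set i (pvReindent (lines.getD i "") (base + (pvCLS (lines.getD i "") - marker)))) (i + 1) (base + (pvCLS (lines.getD i "") - marker))).1 (pvProcessBlock f (lines.set i (pvReindent (lines.getD i "") (base + (pvCLS (lines.getD i "") - marker)))) (i + 1) (base + (pvCLS (lines.getD i "") - marker))).2 marker base).2),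
                  pvSeg_split _ (p0 : i + 1 ≤ (pvProcessBlock f (lines.set i (pvReindent (lines.getD i "") (base + (pvCLS (lines.getD i "") - marker)))) (i + 1) (base + (pvCLS (lines.getD i "") - marker))).2) q0,
                  pvSeg_congr qb, pvSeg_congr htake,
                  pvSeg_single _ (by omega : i < ((lines.set i (pvReindent (lines.getD i "") (base + (pvCLS (lines.getD i "") - marker))))).length), hgd']
                simp
            · rw [if_neg hcolon]
              obtain ⟨r0, r1, r2, rb, rc, rd⟩ := ihBL (lines.set i (pvReindent (lines.getD i "") (base + (pvCLS (lines.getD i "") - marker)))) (i + 1) marker base (by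
                  rw [hlen']; omega) (by rw [hlen']; omega)
              have hdrop3 : (pvBlockLoop f (lines.set i (pvReindent (lines.getD i "") (base + (pvCLS (lines.getD i "") - marker)))) (i + 1) marker base).1.drop
                  (pvBlockLoop f (lines.set i (pvReindent (lines.getD i "") (base + (pvCLS (lines.getD i "") - marker)))) (i + 1) marker base).2
                  = lines.drop (pvBlockLoop f (lines.set i (pvReindent (lines.getD i "") (base + (pvCLS (lines.getD i "") - marker)))) (i + 1) marker base).2 := by
                rw [rc]
                exact pvDrop_mono (pvSet_drop lines i _) (by omega)
              refine ⟨by omega, by omega, by omega, ?_, hdrop3, ?_⟩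
              · rw [pvTake_mono rb (by omega), pvSet_take]
              · intro S
                rw [List.drop_eq_getElem_cons h, ← hgd, pvScan_cons_active hne hci,
                  if_neg (by simpa using hcolon), ← pvSet_drop lines i (pvReindent (lines.getD i "") (base + (pvCLS (lines.getD i "") - marker))),
                  rd S,
                  pvDrop_mono (pvSet_drop lines i (pvReindent (lines.getD i "") (base + (pvCLS (lines.getD i "") - marker))))
                    (r0 : i + 1 ≤ (pvBlockLoop f (lines.set i (pvReindent (lines.getD i "") (base + (pvCLS (lines.getD i "") - marker)))) (i + 1) marker base).2),
                  pvSeg_split _ (Nat.le_succ i) r0, pvSeg_congr rb,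
                  pvSeg_single _ (by omega : i < ((lines.set i (pvReindent (lines.getD i "") (base + (pvCLS (lines.getD i "") - marker))))).length), hgd']
                simp
      · rw [if_neg h]
        refine ⟨le_refl i, hi, rfl, by simp, by simp, ?_⟩
        intro S
        rw [List.drop_eq_nil_of_le (by omega), pvSeg_self]
        simp [pvScan]
    · -- process_block
      intro lines start parent hs hf
      simp only [pvProcessBlock]
      have hfge := pvFNE_ge lines lines.length start
      have hfle := pvFNE_le lines lines.length start hs
      by_cases hm : pvFindNonEmpty lines lines.length start < lines.length
      · rw [if_pos hm]
        obtain ⟨b0, b1, b2, hb, hc, hd⟩ := ihBL lines (pvFindNonEmpty lines lines.length start)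
          (pvCLS (lines.getD (pvFindNonEmpty lines lines.length start) "")) (parent + 4) (le_of_lt hm) (by omega)
        refine ⟨by omega, b1, b2, pvTake_mono hb hfge, hc, ?_⟩
        intro S
        rw [pvScan_skip_empties lines hfge hfle (pvFNE_empty lines lines.length start)
          ((none, parent + 4) :: S)]
        have hgd : lines.getD (pvFindNonEmpty lines lines.length start) "" = lines[(pvFindNonEmpty lines lines.length start)] := by
          simp [List.getD, hm]
        have hne : pvIsEmpty lines[(pvFindNonEmpty lines lines.length start)] = false := by
          rw [← hgd]; exact pvFNE_nonempty lines lines.length start (by omega) hm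
        rw [List.drop_eq_getElem_cons hm, pvScan_cons_pending hne,
          ← List.drop_eq_getElem_cons hm, ← hgd, hd S,
          pvSeg_split _ hfge b0, pvSeg_congr hb]
        simp
      · rw [if_neg hm]
        refine ⟨hfge, by omega, rfl, by simp, by simp, ?_⟩
        intro S
        rw [pvScan_skip_empties lines hfge hfle (pvFNE_empty lines lines.length start)
          ((none, parent + 4) :: S)]
        have hmlen : pvFindNonEmpty lines lines.length start = lines.length := by omega
        simp [hmlen, pvScan]

theorem pvTake_succ (L : List String) {i : Nat} (h : i < L.length) :
    L.take (i + 1) = L.take i ++ [L.getD i ""] := by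
  rw [← pvSeg_zero, pvSeg_split L (Nat.zero_le i) (Nat.le_succ i), pvSeg_single L h, pvSeg_zero]

theorem pvTopLoop_spec (fuel : Nat) (lines : List String) (i : Nat) (hi : i ≤ lines.length)
    (hf : 2 * (lines.length - i) + 1 ≤ fuel) :
    pvTopLoop fuel lines i = lines.take i ++ pvScan [] (lines.drop i) := by
  induction fuel generalizing lines i with
  | zero => omega
  | succ f ih =>
    simp only [pvTopLoop]
    by_cases h : i < lines.length
    · rw [if_pos h]
      have hgd : lines.getD i "" = lines[i] := by simp [List.getD, h]
      by_cases hemp : pvIsEmpty (lines.getD i "") = true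
      · rw [if_pos hemp, ih lines (i + 1) (by omega) (by omega),
          List.drop_eq_getElem_cons h, ← hgd, pvScan_cons_empty _ _ _ hemp,
          pvTake_succ lines h]
        simp
      · have hne : pvIsEmpty (lines.getD i "") = false := by simpa using hemp
        rw [if_neg hemp]
        by_cases hcol : pvEndsColon (lines.getD i "") = true
        · rw [if_pos hcol]
          obtain ⟨p0, p1, p2, pb, pc, pd⟩ := (pvBoth_spec f).2 lines (i + 1)
            (pvCLS (lines.getD i "")) (by omega) (by omega)
          rw [ih (pvProcessBlock f lines (i + 1) (pvCLS (lines.getD i ""))).1 (pvProcessBlock f lines (i + 1) (pvCLS (lines.getD i ""))).2 (by omega) (by omega),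
            List.drop_eq_getElem_cons h, ← hgd, pvScan_cons_nil_stack hne, if_pos hcol,
            pd [], pc,
            ← pvSeg_zero, pvSeg_split _ (Nat.zero_le (i + 1)) p0, pvSeg_zero, pb,
            pvTake_succ lines h]
          simp
        · rw [if_neg hcol, ih lines (i + 1) (by omega) (by omega),
            List.drop_eq_getElem_cons h, ← hgd, pvScan_cons_nil_stack hne,
            if_neg (by simpa using hcol), pvTake_succ lines h]
          simp
    · rw [if_neg h, List.drop_eq_nil_of_le (by omega), List.take_of_length_le (by omega)]
      simp [pvScan]

-- ===== VERDICT (by name: the statement is the Claim_ definition above) =====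
theorem reindent_lines_spec : Claim_equal_reindent_lines := by
  intro lines _
  unfold Spec_reindent_lines reindent_lines reindent_lines_alt
  simpa using pvTopLoop_spec (2 * lines.length + 1) lines 0 (Nat.zero_le _) (by omega)
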